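-- pv_equiv track=rewrite | github.com/helisoya/Internship-Project-AI | processing.py | getMaxEmotion
-- ===== SOURCE A (Python) =====
-- def getMaxEmotion(tab,emotions):
--
--     maxVal = tab[0]
--     maxIndex = 0
--     for i in range(1,len(tab)):
--         if tab[i] > maxVal:
--             maxVal = tab[i]
--             maxIndex = i
--
--     return emotions[maxIndex]
-- ===== SOURCE B (Python) =====
-- def getMaxEmotion(tab, emotions):
--     order = sorted(range(len(tab)), key=lambda i: tab[i], reverse=True)
--     return emotions[order[0]]
-- ===== Notes on version B (the rewrite author's own statement) =====
-- stated objective: alternative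
-- what changed: Replaces the manual running-max scan with a stable descending sort of the index range by value, whose first element is the first argmax index (stability of reverse sort preserves A's strict '>' tie-breaking).
import Mathlib
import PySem

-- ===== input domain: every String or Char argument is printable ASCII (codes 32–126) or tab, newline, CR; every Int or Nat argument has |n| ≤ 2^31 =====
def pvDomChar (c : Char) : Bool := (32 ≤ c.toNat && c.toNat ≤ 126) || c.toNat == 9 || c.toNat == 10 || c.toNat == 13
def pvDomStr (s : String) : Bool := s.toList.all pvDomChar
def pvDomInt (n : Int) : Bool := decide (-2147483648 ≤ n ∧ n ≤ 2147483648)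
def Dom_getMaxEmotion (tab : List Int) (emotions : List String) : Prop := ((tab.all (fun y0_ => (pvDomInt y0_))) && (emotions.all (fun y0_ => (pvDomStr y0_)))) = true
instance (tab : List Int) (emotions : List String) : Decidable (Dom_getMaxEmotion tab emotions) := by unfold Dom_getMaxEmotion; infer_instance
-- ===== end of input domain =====

-- B replaces A's running-max scan by a stable descending sort of the index range (alternative structure, not faster).

-- ===== PORT A =====
def getMaxEmotion (tab : List Int) (emotions : List String) : String :=
  let maxVal := PySem.List.pyGetD tab 0 0
  let s := (PySem.List.pyRange 1 tab.length).foldl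
    (fun (s : Int × Int) i =>
      if PySem.List.pyGetD tab i 0 > s.1 then (PySem.List.pyGetD tab i 0, i) else s)
    (maxVal, 0)
  PySem.List.pyGetD emotions s.2 ""

-- ===== PORT B =====
def getMaxEmotion_alt (tab : List Int) (emotions : List String) : String :=
  let order := PySem.List.sorted (PySem.List.pyRange 0 tab.length)
    (fun i => PySem.List.pyGetD tab i 0) true
  PySem.List.pyGetD emotions (PySem.List.pyGetD order 0 0) ""

-- ===== PRECONDITION & SPEC =====
-- Pre_ = exactly where Python A returns: tab nonempty (tab[0] else IndexError) and the first
-- argmax index of tab is a valid index into emotions (else IndexError on emotions[maxIndex]).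
def Pre_getMaxEmotion (tab : List Int) (emotions : List String) : Prop :=
  tab ≠ [] ∧ ∃ i : Nat, i < tab.length ∧ i < emotions.length ∧
    (∀ j : Nat, j < tab.length → tab.getD j 0 ≤ tab.getD i 0) ∧
    (∀ j : Nat, j < i → tab.getD j 0 < tab.getD i 0)
instance (tab : List Int) (emotions : List String) : Decidable (Pre_getMaxEmotion tab emotions) := by unfold Pre_getMaxEmotion; infer_instance
def pvWitness_getMaxEmotion : List Int × List String := ([1, 3, 2], ["sad", "happy", "angry"])

def Spec_getMaxEmotion (tab : List Int) (emotions : List String) (out : String) : Prop := out = getMaxEmotion_alt tab emotions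
instance (tab : List Int) (emotions : List String) (out : String) : Decidable (Spec_getMaxEmotion tab emotions out) := by unfold Spec_getMaxEmotion; infer_instance

-- ===== CLAIM (what is proved, stated in full; the proofs are below) =====
def Claim_equal_getMaxEmotion : Prop := ∀ (tab : List Int) (emotions : List String), Dom_getMaxEmotion tab emotions → Pre_getMaxEmotion tab emotions → Spec_getMaxEmotion tab emotions (getMaxEmotion tab emotions)

-- ===== LEMMAS AND PROOFS =====

-- The head of repeated reverse-insertions into a nonempty accumulator is the running strict-max
-- (A's loop on indices): insertBy puts x before the first element of strictly smaller key.
theorem pv_head_foldl_insertBy {key : Int → Int} :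
    ∀ (l : List Int) (h : Int) (t : List Int),
      ∃ t', l.foldl (fun acc x => PySem.List.insertBy (fun a b => decide (key b < key a)) x acc) (h :: t)
        = (l.foldl (fun m x => if key m < key x then x else m) h) :: t' := by
  intro l
  induction l with
  | nil => intro h t; exact ⟨t, rfl⟩
  | cons x l ih =>
    intro h t
    simp only [List.foldl_cons, PySem.List.insertBy]
    by_cases hc : key h < key x
    · simpa [hc] using ih x (h :: t)
    · simpa [hc] using ih h (PySem.List.insertBy (fun a b => decide (key b < key a)) x t)

-- A's pair-valued fold is the index fold paired with its key (the invariant s.1 = key s.2).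
theorem pv_pairfold {key : Int → Int} :
    ∀ (l : List Int) (m : Int),
      l.foldl (fun (s : Int × Int) i => if key i > s.1 then (key i, i) else s) (key m, m)
        = (key (l.foldl (fun m x => if key m < key x then x else m) m),
           l.foldl (fun m x => if key m < key x then x else m) m) := by
  intro l
  induction l with
  | nil => intro m; rfl
  | cons x l ih =>
    intro m
    simp only [List.foldl_cons, gt_iff_lt]
    by_cases hc : key m < key x
    · simpa [hc] using ih x
    · simpa [hc] using ih m

theorem getMaxEmotion_spec : Claim_equal_getMaxEmotion := by
  intro tab emotions _ hpre
  unfold Spec_getMaxEmotion getMaxEmotion getMaxEmotion_alt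
  obtain ⟨hne, -⟩ := hpre
  have hn : (0 : Int) < (tab.length : Int) := by
    have := List.length_pos_iff.mpr hne
    exact_mod_cast this
  set key : Int → Int := fun i => PySem.List.pyGetD tab i 0 with hkey
  have hrange : PySem.List.pyRange 0 (tab.length) = 0 :: PySem.List.pyRange 1 (tab.length) :=
    PySem.List.pyRange_one_cons hn
  -- B's head
  obtain ⟨t', ht'⟩ := pv_head_foldl_insertBy (key := key) (PySem.List.pyRange 1 (tab.length)) 0 []
  have hsorted : PySem.List.sorted (PySem.List.pyRange 0 (tab.length)) key true
      = ((PySem.List.pyRange 1 (tab.length)).foldl (fun m x => if key m < key x then x else m) 0) :: t' := by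
    rw [PySem.List.sorted_rev_eq_foldl_insertBy, hrange, List.foldl_cons]
    exact ht'
  have hA := pv_pairfold (key := key) (PySem.List.pyRange 1 (tab.length)) 0
  simp only [hkey] at hA hsorted
  show PySem.List.pyGetD emotions
      ((List.foldl (fun (s : Int × Int) i => if PySem.List.pyGetD tab i 0 > s.1 then (PySem.List.pyGetD tab i 0, i) else s)
        (PySem.List.pyGetD tab 0 0, 0) (PySem.List.pyRange 1 (tab.length))).2) ""
    = PySem.List.pyGetD emotions
      (PySem.List.pyGetD (PySem.List.sorted (PySem.List.pyRange 0 (tab.length)) (fun i => PySem.List.pyGetD tab i 0) true) 0 0) ""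
  rw [hA, hsorted]
  rw [show ((0 : Int) = ((0 : Nat) : Int)) from rfl, PySem.List.pyGetD_natCast]
  rfl
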